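-- pv_equiv track=rewrite | github.com/auttij/Advent-of-Code | 2024/15/day.py | parse
-- ===== SOURCE A (Python) =====
-- def parse(arr):
--     maze = []
--     out = []
--     i = 0
--     half = False
--     while i < len(arr):
--         if len(arr[i]) == 0:
--             half = True
--         elif not half:
--             maze.append(list(arr[i]))
--         else:
--             out.append(arr[i])
--         i += 1
--     return maze, list("".join(out))
-- ===== SOURCE B (Python) =====
-- def parse(arr):
--     idx = arr.index('') if '' in arr else len(arr)
--     maze = [list(x) for x in arr[:idx]]
--     out = [x for x in arr[idx + 1:] if len(x) > 0]
--     return maze, list(''.join(out))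
-- ===== Notes on version B (the rewrite author's own statement) =====
-- stated objective: simpler
-- what changed: Replaces the index-and-flag while loop with a find-then-slice decomposition: locate the first blank line, then build the maze and the move list with two comprehensions over the two slices.
import Mathlib
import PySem

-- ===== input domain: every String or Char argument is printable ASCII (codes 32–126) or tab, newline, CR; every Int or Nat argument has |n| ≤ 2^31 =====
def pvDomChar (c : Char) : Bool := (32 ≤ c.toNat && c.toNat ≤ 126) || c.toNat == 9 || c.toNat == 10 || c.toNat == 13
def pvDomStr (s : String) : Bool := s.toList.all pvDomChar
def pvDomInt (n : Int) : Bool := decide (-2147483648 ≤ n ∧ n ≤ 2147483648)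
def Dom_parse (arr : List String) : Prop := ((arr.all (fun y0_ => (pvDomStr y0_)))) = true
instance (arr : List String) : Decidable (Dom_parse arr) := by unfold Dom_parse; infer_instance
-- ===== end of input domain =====

-- B changes A's flag-based single pass into find-the-blank-line-then-slice with two comprehensions (simpler decomposition, same cost).

-- ===== PORT A =====
-- list(s) for a string s: the list of its one-character strings
def pvChars (s : String) : List String := s.toList.map (fun c => String.ofList [c])

-- A's while loop, step for step: state (maze, out, half), one element per iteration
def parseLoopA : List String → List (List String) → List String → Bool → List (List String) × List String
  | [], maze, out, _ => (maze, out)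
  | s :: rest, maze, out, half =>
    if PySem.Str.len s = 0 then parseLoopA rest maze out true
    else if half = false then parseLoopA rest (maze ++ [pvChars s]) out half
    else parseLoopA rest maze (out ++ [s]) half

def parse (arr : List String) : List (List String) × List String :=
  let r := parseLoopA arr [] [] false
  (r.1, pvChars (PySem.Str.join "" r.2))

-- ===== PORT B =====
def parse_alt (arr : List String) : List (List String) × List String :=
  let idx : Nat := match PySem.List.index? arr "" with
    | some i => i
    | none => arr.length
  let maze := (arr.take idx).map pvChars          -- arr[:idx] with 0 ≤ idx ≤ len: exact
  let out := (arr.drop (idx + 1)).filter (fun x => decide (0 < PySem.Str.len x))  -- arr[idx+1:]: exact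
  (maze, pvChars (PySem.Str.join "" out))

-- ===== PRECONDITION & SPEC =====
def Spec_parse (arr : List String) (out : List (List String) × List String) : Prop := out = parse_alt arr
instance (arr : List String) (out : List (List String) × List String) : Decidable (Spec_parse arr out) := by unfold Spec_parse; infer_instance

-- ===== CLAIM (what is proved, stated in full; the proofs are below) =====
def Claim_equal_parse : Prop := ∀ (arr : List String), Dom_parse arr → Spec_parse arr (parse arr)

-- ===== LEMMAS AND PROOFS =====

theorem pv_len_zero_iff (s : String) : PySem.Str.len s = 0 ↔ s = "" := by
  simp [PySem.Str.len_eq]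

theorem pv_len_pos (s : String) (h : s ≠ "") : 0 < s.length :=
  Nat.pos_of_ne_zero (by simpa using h)

theorem parseLoopA_true (rest : List String) (m : List (List String)) (o : List String) :
    parseLoopA rest m o true = (m, o ++ rest.filter (fun x => decide (0 < PySem.Str.len x))) := by
  induction rest generalizing o with
  | nil => simp [parseLoopA]
  | cons x t ih =>
    by_cases hx : x = ""
    · subst hx; simp [parseLoopA, ih]
    · have h0 : ¬ PySem.Str.len x = 0 := fun h => hx ((pv_len_zero_iff x).mp h)
      simp [parseLoopA, hx, ih, pv_len_pos x hx]

theorem parseLoopA_false (rest : List String) (m : List (List String)) :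
    parseLoopA rest m [] false =
      (m ++ ((rest.take (match PySem.List.index? rest "" with | some i => i | none => rest.length)).map pvChars),
       (rest.drop ((match PySem.List.index? rest "" with | some i => i | none => rest.length) + 1)).filter
         (fun x => decide (0 < PySem.Str.len x))) := by
  induction rest generalizing m with
  | nil => simp [parseLoopA, PySem.List.index?]
  | cons s t ih =>
    by_cases hs : s = ""
    · subst hs
      rw [PySem.List.index?_cons_self]
      simp [parseLoopA, PySem.Str.len, parseLoopA_true]
    · have hlen : ¬ PySem.Str.len s = 0 := fun h => hs ((pv_len_zero_iff s).mp h)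
      have hpos := pv_len_pos s hs
      rw [PySem.List.index?_cons_of_ne t (show s ≠ "" from hs)]
      cases hidx : PySem.List.index? t "" with
      | none =>
        simp only [PySem.List.index?_eq_idxOf?] at hidx
        simp [parseLoopA, hs, ih, hidx]
      | some i =>
        simp only [PySem.List.index?_eq_idxOf?] at hidx
        simp [parseLoopA, hs, ih, hidx]

-- ===== VERDICT (by name: the statement is the Claim_ definition above) =====
theorem parse_spec : Claim_equal_parse := by
  intro arr _
  unfold Spec_parse parse parse_alt
  rw [parseLoopA_false]
  simp
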